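-- pv_equiv track=rewrite | github.com/sidssn/paul-test | app.py | get_unsuccessful_releases_count
-- ===== SOURCE A (Python) =====
-- def get_unsuccessful_releases_count(releases_by_group, success_live, success_int):
--     """
--     Loop through all the releases that had successful integration deployments but no successful live ones and store the
--     count in a dict with the project group as the key
--     :param releases_by_group: Dictionary where the list of releases are grouped by the project group
--     :param success_live: Dictionary with all release versions and deployed times for successful deployments to Live
--     :param success_int: Dictionary with all release versions and deployed times for successful deployments to Integration
--     """
--     unsuccessful_rel = { k : success_int[k] for k in set(success_int) - set(success_live)}
--     unsuccessful_rel_by_proj_group = {}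
--     for key in releases_by_group.keys():
--         for rel in releases_by_group[key]:
--             if rel["version"] in unsuccessful_rel:
--                 if key in unsuccessful_rel_by_proj_group:
--                     unsuccessful_rel_by_proj_group[key] += 1
--                 else:
--                     unsuccessful_rel_by_proj_group[key] = 1
--
--     return unsuccessful_rel_by_proj_group
-- ===== SOURCE B (Python) =====
-- def get_unsuccessful_releases_count(releases_by_group, success_live, success_int):
--     """Inverted fan-out: first index every release occurrence by its version
--     (version -> list of group keys, one entry per occurrence), then walk only
--     the unsuccessful versions and distribute increments through the index;
--     finally emit the non-empty counters in releases_by_group order."""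
--     index = {}
--     for key, rels in releases_by_group.items():
--         for rel in rels:
--             index.setdefault(rel["version"], []).append(key)
--     counts = {}
--     for version in set(success_int) - set(success_live):
--         for key in index.get(version, []):
--             counts[key] = counts.get(key, 0) + 1
--     return {key: counts[key] for key in releases_by_group if key in counts}
-- ===== Notes on version B (the rewrite author's own statement) =====
-- stated objective: alternative
-- what changed: Inverts A's nested membership scan: B first builds an inverted index version -> list of group keys (one entry per occurrence), then iterates only the unsuccessful versions and fans increments out through the index into a counter dict, finally emitting the non-zero counters in releases_by_group order; A instead walks every release of every group testing its version against the set difference.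
import Mathlib
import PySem

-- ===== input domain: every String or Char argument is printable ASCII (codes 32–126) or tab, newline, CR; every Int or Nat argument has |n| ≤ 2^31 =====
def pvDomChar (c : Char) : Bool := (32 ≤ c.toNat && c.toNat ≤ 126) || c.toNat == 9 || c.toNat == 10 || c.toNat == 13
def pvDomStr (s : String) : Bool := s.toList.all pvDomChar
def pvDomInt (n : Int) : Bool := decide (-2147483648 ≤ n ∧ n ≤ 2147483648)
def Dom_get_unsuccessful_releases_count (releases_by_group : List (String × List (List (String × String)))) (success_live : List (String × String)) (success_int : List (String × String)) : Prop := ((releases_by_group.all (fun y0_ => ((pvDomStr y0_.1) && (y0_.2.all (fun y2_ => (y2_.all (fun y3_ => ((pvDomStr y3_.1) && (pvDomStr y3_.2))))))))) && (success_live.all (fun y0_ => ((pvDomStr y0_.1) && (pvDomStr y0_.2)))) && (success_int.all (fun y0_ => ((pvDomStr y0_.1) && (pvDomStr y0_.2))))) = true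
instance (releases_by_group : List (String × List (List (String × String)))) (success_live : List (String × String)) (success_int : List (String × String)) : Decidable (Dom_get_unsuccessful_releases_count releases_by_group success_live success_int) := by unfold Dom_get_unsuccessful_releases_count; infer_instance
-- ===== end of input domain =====

-- B inverts A's nested membership scan: an index version -> group keys is built first, then only the
-- unsuccessful versions fan increments out through it, and the counters are emitted in group order
-- (objective: alternative decomposition, same cost).
-- ===== PORT A =====
def get_unsuccessful_releases_count (releases_by_group : List (String × List (List (String × String)))) (success_live : List (String × String)) (success_int : List (String × String)) : List (String × Int) :=
  -- set(success_int) - set(success_live): Python iterates the dicts' keys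
  let unsuccessful_keys := PySem.Set.diff (PySem.Set.ofList (PySem.Dict.mk success_int).keys) (PySem.Set.ofList (PySem.Dict.mk success_live).keys)
  -- {k : success_int[k] for k in ...}: the set's iteration order is consumed only by a dict that is
  -- later only membership-tested; success_int[k] never raises here (k is one of its keys), so getD is exact
  let unsuccessful_rel : PySem.Dict String String :=
    unsuccessful_keys.foldl (fun d k => d.insert k ((PySem.Dict.mk success_int).getD k "")) PySem.Dict.empty
  let res : PySem.Dict String Int :=
    (PySem.Dict.mk releases_by_group).keys.foldl (fun acc key =>
      ((PySem.Dict.mk releases_by_group).getD key []).foldl (fun acc rel =>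
        -- rel["version"]: Pre_ guarantees the key is present, so getD is exact
        if unsuccessful_rel.contains ((PySem.Dict.mk rel).getD "version" "") then
          if acc.contains key then acc.insert key (acc.getD key 0 + 1) else acc.insert key 1
        else acc) acc) PySem.Dict.empty
  res.items

-- ===== PORT B =====
def get_unsuccessful_releases_count_alt (releases_by_group : List (String × List (List (String × String)))) (success_live : List (String × String)) (success_int : List (String × String)) : List (String × Int) :=
  -- index.setdefault(rel["version"], []).append(key): d[v] = d.get(v, []) + [key] = Dict.modify
  let index : PySem.Dict String (List String) :=
    releases_by_group.foldl (fun d g =>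
      g.2.foldl (fun d rel =>
        d.modify ((PySem.Dict.mk rel).getD "version" "") [] (· ++ [g.1])) d) PySem.Dict.empty
  let bad := PySem.Set.diff (PySem.Set.ofList (success_int.map Prod.fst)) (PySem.Set.ofList (success_live.map Prod.fst))
  -- the set's iteration order feeds only commutative counter increments, and counts is only looked
  -- up afterwards, so the result cannot depend on Python's hash order
  let counts : PySem.Dict String Int :=
    bad.foldl (fun c v =>
      (index.getD v []).foldl (fun c k => c.insert k (c.getD k 0 + 1)) c) PySem.Dict.empty
  -- {key: counts[key] for key in releases_by_group if key in counts}
  releases_by_group.filterMap (fun g =>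
    if counts.contains g.1 then some (g.1, counts.getD g.1 0) else none)

-- ===== PRECONDITION & SPEC =====
-- Pre_ excludes (a) release dicts lacking a "version" key, on which A raises KeyError, and
-- (b) association lists with duplicate keys (per group map or per release dict), which cannot
-- arise from a Python dict and whose first-vs-last-match behaviour no one would specify.
def Pre_get_unsuccessful_releases_count (releases_by_group : List (String × List (List (String × String)))) (_success_live : List (String × String)) (_success_int : List (String × String)) : Prop :=
  (releases_by_group.map Prod.fst).Nodup ∧
  ∀ g ∈ releases_by_group, ∀ rel ∈ g.2, (rel.map Prod.fst).Nodup ∧ "version" ∈ rel.map Prod.fst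
instance (releases_by_group : List (String × List (List (String × String)))) (success_live : List (String × String)) (success_int : List (String × String)) : Decidable (Pre_get_unsuccessful_releases_count releases_by_group success_live success_int) := by unfold Pre_get_unsuccessful_releases_count; infer_instance

def pvWitness_get_unsuccessful_releases_count : (List (String × List (List (String × String)))) × (List (String × String)) × (List (String × String)) :=
  ([("grp", [[("version", "1.0")], [("version", "2.0")]]), ("other", [])], [("2.0", "t1")], [("1.0", "t2"), ("2.0", "t3")])

def Spec_get_unsuccessful_releases_count (releases_by_group : List (String × List (List (String × String)))) (success_live : List (String × String)) (success_int : List (String × String)) (out : List (String × Int)) : Prop := out = get_unsuccessful_releases_count_alt releases_by_group success_live success_int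
instance (releases_by_group : List (String × List (List (String × String)))) (success_live : List (String × String)) (success_int : List (String × String)) (out : List (String × Int)) : Decidable (Spec_get_unsuccessful_releases_count releases_by_group success_live success_int out) := by unfold Spec_get_unsuccessful_releases_count; infer_instance

-- ===== CLAIM (what is proved, stated in full; the proofs are below) =====
def Claim_equal_get_unsuccessful_releases_count : Prop := ∀ (releases_by_group : List (String × List (List (String × String)))) (success_live : List (String × String)) (success_int : List (String × String)), Dom_get_unsuccessful_releases_count releases_by_group success_live success_int → Pre_get_unsuccessful_releases_count releases_by_group success_live success_int → Spec_get_unsuccessful_releases_count releases_by_group success_live success_int (get_unsuccessful_releases_count releases_by_group success_live success_int)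

-- ===== LEMMAS AND PROOFS =====

-- rel["version"], shared shorthand of the proofs
def pvVer (rel : List (String × String)) : String := (PySem.Dict.mk rel).getD "version" ""

-- ---- A side: characterise A's counting loop as a filterMap ----

-- the body of A's inner loop, for a fixed membership predicate P and group key
def pvStep (P : List (String × String) → Bool) (key : String) (acc : PySem.Dict String Int) (rel : List (String × String)) : PySem.Dict String Int :=
  if P rel then
    if acc.contains key then acc.insert key (acc.getD key 0 + 1) else acc.insert key 1
  else acc

lemma pvInnerShift (P : List (String × String) → Bool) (rels : List (List (String × String))) (key : String) (acc : PySem.Dict String Int) (j : Int) :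
    rels.foldl (pvStep P key) (acc.insert key j) = acc.insert key (j + (rels.countP P : Int)) := by
  induction rels generalizing j with
  | nil => simp
  | cons rel rels ih =>
    by_cases h : P rel = true
    · simp only [List.foldl_cons, pvStep, if_true, PySem.Dict.contains_insert_self,
        PySem.Dict.getD_insert_self, PySem.Dict.insert_insert_self, ih, List.countP_cons, h]
      congr 1
      push_cast
      ring
    · simp only [List.foldl_cons, pvStep, h, List.countP_cons]
      simpa [h] using ih j

lemma pvInner (P : List (String × String) → Bool) (rels : List (List (String × String))) (key : String) (acc : PySem.Dict String Int) (h : acc.contains key = false) :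
    rels.foldl (pvStep P key) acc =
      if (rels.countP P : Int) = 0 then acc else acc.insert key (rels.countP P : Int) := by
  induction rels with
  | nil => simp
  | cons rel rels ih =>
    by_cases hp : P rel = true
    · simp only [List.foldl_cons, pvStep, if_true, h, if_false, Bool.false_eq_true,
        pvInnerShift, List.countP_cons, hp]
      rw [if_neg (by positivity)]
      congr 1
      push_cast
      ring
    · simp only [List.foldl_cons, pvStep, if_false, Bool.false_eq_true, ih, List.countP_cons, hp]
      simp

-- what A computes for one group, as a function of the predicate
def pvGroupOut (P : List (String × String) → Bool) (g : String × List (List (String × String))) : Option (String × Int) :=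
  let n : Int := (g.2.countP P : Int)
  if n = 0 then none else some (g.1, n)

lemma pvOuter (P : List (String × String) → Bool) (l : List (String × List (List (String × String)))) (acc : PySem.Dict String Int)
    (hnd : (l.map Prod.fst).Nodup) (hfresh : ∀ g ∈ l, acc.contains g.1 = false) :
    (l.foldl (fun a g => g.2.foldl (pvStep P g.1) a) acc).items = acc.items ++ l.filterMap (pvGroupOut P) := by
  induction l generalizing acc with
  | nil => simp
  | cons g l ih =>
    simp only [List.map_cons, List.nodup_cons] at hnd
    have hg : acc.contains g.1 = false := hfresh g (List.mem_cons_self ..)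
    simp only [List.foldl_cons, pvInner P g.2 g.1 acc hg]
    by_cases hz : ((g.2.countP P : Nat) : Int) = 0
    · rw [if_pos hz, ih acc hnd.2 (fun g' hg' => hfresh g' (List.mem_cons_of_mem _ hg')),
        List.filterMap_cons, show pvGroupOut P g = none from by
          simp only [pvGroupOut]; exact if_pos hz]
    · rw [if_neg hz]
      rw [ih _ hnd.2 ?_]
      · rw [List.filterMap_cons, show pvGroupOut P g = some (g.1, ((g.2.countP P : Nat) : Int)) from by
          simp only [pvGroupOut]; exact if_neg hz]
        rw [PySem.Dict.items_insert_of_not_contains]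
        · simp
        · exact hg
      · intro g' hg'
        rw [PySem.Dict.contains_insert]
        have hne : g'.1 ≠ g.1 := by
          intro e
          exact hnd.1 (e ▸ List.mem_map_of_mem hg')
        simp [hne, hfresh g' (List.mem_cons_of_mem _ hg')]

-- ---- B side: characterise the inverted index and the fan-out counter ----

-- the release occurrences of rbg as flat (version, group-key) pairs
def pvPairs (rbg : List (String × List (List (String × String)))) : List (String × String) :=
  rbg.flatMap (fun g => g.2.map (fun rel => (pvVer rel, g.1)))

lemma pvIdx_getD (rbg : List (String × List (List (String × String)))) (v : String) :
    (rbg.foldl (fun d g => g.2.foldl (fun d rel =>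
        d.modify (pvVer rel) [] (· ++ [g.1])) d) PySem.Dict.empty).getD v []
      = ((pvPairs rbg).filter (fun p => p.1 == v)).map (·.2) := by
  have h : rbg.foldl (fun d g => g.2.foldl (fun d rel =>
        d.modify (pvVer rel) [] (· ++ [g.1])) d) PySem.Dict.empty
      = (pvPairs rbg).foldl (fun d p => d.modify p.1 [] (· ++ [p.2])) PySem.Dict.empty := by
    simp only [pvPairs, List.foldl_flatMap, List.foldl_map]
  rw [h, PySem.Dict.getD_foldl_modify_append, PySem.Dict.getD_empty, List.nil_append]

-- a pair of pvPairs always carries a group key of rbg in its second component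
lemma pvPairs_snd_mem (l : List (String × List (List (String × String)))) (p : String × String)
    (h : p ∈ pvPairs l) : p.2 ∈ l.map Prod.fst := by
  simp only [pvPairs, List.mem_flatMap, List.mem_map] at h
  obtain ⟨g, hg, rel, _, rfl⟩ := h
  exact List.mem_map_of_mem hg

-- count of group key g.1 among the occurrences of version v, when the group keys are unique
lemma pvPairs_countP (g : String × List (List (String × String))) (v : String) :
    ∀ (rbg : List (String × List (List (String × String)))),
    (rbg.map Prod.fst).Nodup → g ∈ rbg →
    (pvPairs rbg).countP (fun p => p.2 == g.1 && p.1 == v)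
      = g.2.countP (fun rel => pvVer rel == v) := by
  intro rbg
  induction rbg with
  | nil => intro _ hg; cases hg
  | cons g' l ih =>
    intro hnd hg
    simp only [List.map_cons, List.nodup_cons] at hnd
    have hx : pvPairs (g' :: l) = g'.2.map (fun rel => (pvVer rel, g'.1)) ++ pvPairs l := by
      simp [pvPairs]
    rw [hx, List.countP_append, List.countP_map]
    rcases List.mem_cons.mp hg with rfl | hgl
    · have h2 : (pvPairs l).countP (fun p => p.2 == g.1 && p.1 == v) = 0 := by
        apply List.countP_eq_zero.mpr
        intro p hp
        have hm := pvPairs_snd_mem l p hp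
        have hne : p.2 ≠ g.1 := fun e => hnd.1 (e ▸ hm)
        simp [hne]
      rw [h2, Nat.add_zero]
      apply List.countP_congr
      intro rel _
      simp
    · have hne : g'.1 ≠ g.1 := by
        intro e
        exact hnd.1 (e ▸ List.mem_map_of_mem hgl)
      have h1 : List.countP ((fun p : String × String => p.2 == g.1 && p.1 == v) ∘
          fun rel => (pvVer rel, g'.1)) g'.2 = 0 := by
        apply List.countP_eq_zero.mpr
        intro rel _
        simp [hne]
      rw [h1, Nat.zero_add]
      exact ih hnd.2 hgl

-- splitting off one fresh element of the membership list
lemma pvCountSplit (v : String) (vs ws : List String) (hv : v ∉ vs) :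
    ws.countP (fun w => decide (w ∈ v :: vs)) = ws.count v + ws.countP (fun w => decide (w ∈ vs)) := by
  induction ws with
  | nil => simp
  | cons w ws ihw =>
    simp only [List.countP_cons, List.count_cons, ihw]
    by_cases hw : w = v
    · subst hw
      have hnm : (w ∈ vs) = False := by simp [hv]
      simp [hnm, List.mem_cons]
      omega
    · by_cases hmem : w ∈ vs <;> (simp [hw, hmem, List.mem_cons]; try omega)

-- Σ over a duplicate-free list vs of ws.count v = how many elements of ws lie in vs
lemma pvCountSum (vs ws : List String) (hnd : vs.Nodup) :
    (vs.map (fun v => ws.count v)).sum = ws.countP (fun w => decide (w ∈ vs)) := by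
  induction vs with
  | nil => simp
  | cons v vs ih =>
    simp only [List.nodup_cons] at hnd
    rw [pvCountSplit v vs ws hnd.1, List.map_cons, List.sum_cons, ih hnd.2]

-- ===== VERDICT (by name: the statement is the Claim_ definition above) =====
theorem get_unsuccessful_releases_count_spec : Claim_equal_get_unsuccessful_releases_count := by
  intro rbg sl si _hdom hpre
  obtain ⟨hnd, _hver⟩ := hpre
  unfold Spec_get_unsuccessful_releases_count
  -- the shared set difference and membership predicate
  set bad := PySem.Set.diff (PySem.Set.ofList (si.map Prod.fst)) (PySem.Set.ofList (sl.map Prod.fst)) with hbad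
  set PB := (fun rel : List (String × String) => PySem.Set.contains bad (pvVer rel)) with hPBdef
  -- ---- step 1: A's result is rbg.filterMap (pvGroupOut PB) ----
  have hA : get_unsuccessful_releases_count rbg sl si = rbg.filterMap (pvGroupOut PB) := by
    -- membership in A's unsuccessful_rel dict = membership in the set difference
    have hP : ∀ v : String,
        PySem.Dict.contains
          ((PySem.Set.diff (PySem.Set.ofList (PySem.Dict.mk si).keys) (PySem.Set.ofList (PySem.Dict.mk sl).keys)).foldl
            (fun d k => d.insert k ((PySem.Dict.mk si).getD k "")) PySem.Dict.empty) v
        = PySem.Set.contains bad v := by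
      intro v
      rw [PySem.Dict.contains_eq_decide_mem_keys, PySem.Dict.keys_foldl_insert,
        PySem.Dict.keys_empty, PySem.Set.update_nil_left,
        PySem.Set.ofList_eq_self_of_nodup _ (PySem.Set.nodup_diff _ _ (PySem.Set.nodup_ofList _))]
      simp [hbad, PySem.Set.contains_eq_listContains]
    have hfe :
        (fun rel => PySem.Dict.contains
          ((PySem.Set.diff (PySem.Set.ofList (PySem.Dict.mk si).keys) (PySem.Set.ofList (PySem.Dict.mk sl).keys)).foldl
            (fun d k => d.insert k ((PySem.Dict.mk si).getD k "")) PySem.Dict.empty)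
          ((PySem.Dict.mk rel).getD "version" ""))
        = PB :=
      funext fun rel => hP _
    show (((PySem.Dict.mk rbg).keys).foldl
        (fun acc key => ((PySem.Dict.mk rbg).getD key []).foldl
          (pvStep (fun rel => PySem.Dict.contains
            ((PySem.Set.diff (PySem.Set.ofList (PySem.Dict.mk si).keys) (PySem.Set.ofList (PySem.Dict.mk sl).keys)).foldl
              (fun d k => d.insert k ((PySem.Dict.mk si).getD k "")) PySem.Dict.empty)
            ((PySem.Dict.mk rel).getD "version" "")) key) acc) PySem.Dict.empty).items
      = rbg.filterMap (pvGroupOut PB)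
    rw [hfe]
    have hkeys : (PySem.Dict.mk rbg).keys = rbg.map Prod.fst := rfl
    rw [hkeys, List.foldl_map]
    have hbody : rbg.foldl
        (fun acc g => ((PySem.Dict.mk rbg).getD g.1 []).foldl (pvStep PB g.1) acc) PySem.Dict.empty
      = rbg.foldl (fun acc g => g.2.foldl (pvStep PB g.1) acc) PySem.Dict.empty := by
      apply PySem.List.foldl_congr_mem
      intro acc g hg
      rw [PySem.Dict.getD_of_mem_items (PySem.Dict.mk rbg)
        (show (g.1, g.2) ∈ (PySem.Dict.mk rbg).items from hg) hnd []]
    rw [hbody]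
    rw [pvOuter PB rbg PySem.Dict.empty hnd (fun g _ => PySem.Dict.contains_empty g.1)]
    rfl
  -- ---- step 2: B's result is the same filterMap ----
  rw [hA]
  show rbg.filterMap (pvGroupOut PB) =
    (let index : PySem.Dict String (List String) :=
      rbg.foldl (fun d g => g.2.foldl (fun d rel =>
        d.modify ((PySem.Dict.mk rel).getD "version" "") [] (· ++ [g.1])) d) PySem.Dict.empty
     let counts : PySem.Dict String Int :=
      bad.foldl (fun c v =>
        (index.getD v []).foldl (fun c k => c.insert k (c.getD k 0 + 1)) c) PySem.Dict.empty
     rbg.filterMap (fun g =>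
      if counts.contains g.1 then some (g.1, counts.getD g.1 0) else none))
  set idxD : PySem.Dict String (List String) :=
    rbg.foldl (fun d g => g.2.foldl (fun d rel =>
      d.modify ((PySem.Dict.mk rel).getD "version" "") [] (· ++ [g.1])) d) PySem.Dict.empty with hidx
  set counts : PySem.Dict String Int :=
    bad.foldl (fun c v =>
      (idxD.getD v []).foldl (fun c k => c.insert k (c.getD k 0 + 1)) c) PySem.Dict.empty with hcounts
  set flat : List String := bad.flatMap (fun v => idxD.getD v []) with hflatdef
  have hflat : counts = flat.foldl (fun c k => c.insert k (c.getD k 0 + 1)) PySem.Dict.empty := by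
    rw [hflatdef, List.foldl_flatMap]
  have hgetD : ∀ k, counts.getD k 0 = (flat.count k : Int) := by
    intro k
    rw [hflat, PySem.Dict.getD_foldl_insert_add_one, PySem.Dict.getD_empty, zero_add]
  have hcont : ∀ k, counts.contains k = decide (k ∈ flat) := by
    intro k
    rw [hflat, PySem.Dict.contains_eq_decide_mem_keys, PySem.Dict.keys_foldl_insert,
      PySem.Dict.keys_empty, PySem.Set.update_nil_left]
    simp [PySem.Set.mem_ofList]
  have hbadnd : bad.Nodup := PySem.Set.nodup_diff _ _ (PySem.Set.nodup_ofList _)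
  have hcount_flat : ∀ g ∈ rbg, flat.count g.1
      = g.2.countP (fun rel => decide (pvVer rel ∈ bad)) := by
    intro g hg
    rw [hflatdef, List.count_flatMap]
    have h1 : bad.map (List.count g.1 ∘ fun v => idxD.getD v [])
        = bad.map (fun v => (g.2.map pvVer).count v) := by
      apply List.map_congr_left
      intro v _
      have hidxv : idxD.getD v [] = ((pvPairs rbg).filter (fun p => p.1 == v)).map (·.2) := by
        rw [hidx]
        exact pvIdx_getD rbg v
      simp only [Function.comp_def, hidxv]
      rw [List.count_eq_countP, List.countP_map, List.countP_filter,
        List.count_eq_countP, List.countP_map]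
      rw [show (fun p : String × String => ((fun x => x == g.1) ∘ fun p : String × String => p.2) p
          && (p.1 == v)) = (fun p : String × String => p.2 == g.1 && p.1 == v) from rfl]
      rw [pvPairs_countP g v rbg hnd hg]
      rfl
    rw [h1, pvCountSum bad (g.2.map pvVer) hbadnd, List.countP_map]
    rfl
  apply List.filterMap_congr
  intro g hg
  have hPBn : g.2.countP PB = g.2.countP (fun rel => decide (pvVer rel ∈ bad)) := by
    apply List.countP_congr
    intro rel _
    simp [hPBdef, PySem.Set.contains_eq_listContains, List.contains_eq_mem]
  rw [pvGroupOut, hcont, hgetD, hcount_flat g hg, ← hPBn]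
  by_cases hz : g.2.countP PB = 0
  · have hnm : g.1 ∉ flat := by
      intro hm
      have := List.count_pos_iff.mpr hm
      rw [hcount_flat g hg, ← hPBn] at this
      omega
    simp [hz, hnm]
  · have hm : g.1 ∈ flat := by
      apply List.count_pos_iff.mp
      rw [hcount_flat g hg, ← hPBn]
      omega
    simp [hz, hm]
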